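-- pv_equiv track=rewrite | github.com/brandonharris177/edabit-challanges | index.py | rowsRearranging
-- ===== SOURCE A (Python) =====
-- def rowsRearranging(matrix):
--     if len(matrix) == 1:
--         return True
--     hashTable = {}
--     keys = []
--     for rowIndex in range(len(matrix)):
--         key = matrix[rowIndex][0]
--         if key in hashTable:
--             return False
--         hashTable[key] = matrix[rowIndex]
--         keys.append(key)
--     keys.sort()
--     for column in range(1, len(matrix[0])):
--         lastNum = hashTable[keys[0]][column]
--         for keyIndex in range(1, len(keys)):
--             nextNum = hashTable[keys[keyIndex]][column]
--             if lastNum >= nextNum: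
--                 return False
--             lastNum = nextNum
--     return True
-- ===== SOURCE B (Python) =====
-- def _dominates(a, b, m):
--     for c in range(m):
--         if a[c] >= b[c]:
--             return False
--     return True
--
-- def rowsRearranging(matrix):
--     m = len(matrix[0])
--     for i in range(len(matrix)):
--         a = matrix[i]
--         for b in matrix[i + 1:]:
--             if not _dominates(a, b, m) and not _dominates(b, a, m):
--                 return False
--     return True
-- ===== Notes on version B (the rewrite author's own statement) =====
-- stated objective: alternative
-- what changed: Replaced A's sort-based algorithm (hash rows by first element, sort the keys, scan consecutive rows column by column) by a sort-free quadratic comparability test: for every unordered pair of rows check that one strictly dominates the other in every column, which holds iff a strict total order on the rows (and hence a valid arrangement) exists.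
-- outside the precondition, e.g. on rowsRearranging([[1, 2], [3], [3, 4]]): A returns False, B raises IndexError
import Mathlib
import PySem

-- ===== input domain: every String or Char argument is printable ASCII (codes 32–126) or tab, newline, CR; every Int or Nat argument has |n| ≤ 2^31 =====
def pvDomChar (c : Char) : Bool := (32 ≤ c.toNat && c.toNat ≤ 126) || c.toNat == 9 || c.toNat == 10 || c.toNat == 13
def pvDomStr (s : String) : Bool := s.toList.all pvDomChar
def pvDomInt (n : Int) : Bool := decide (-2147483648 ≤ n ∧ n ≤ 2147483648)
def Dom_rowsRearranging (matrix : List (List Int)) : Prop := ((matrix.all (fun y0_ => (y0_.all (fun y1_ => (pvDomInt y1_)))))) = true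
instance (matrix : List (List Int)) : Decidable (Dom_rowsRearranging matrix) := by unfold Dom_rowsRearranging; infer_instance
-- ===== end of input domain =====

-- B drops A's sorting entirely: it checks that every unordered pair of rows is comparable under
-- strict all-column dominance (a valid arrangement exists iff that holds); return value only.

-- ===== PORT A =====
-- first loop: builds hashTable and keys; none = the early `return False` on a duplicate key
def pvBuildA : List (List Int) → PySem.Dict Int (List Int) → List Int →
    Option (PySem.Dict Int (List Int) × List Int)
  | [], ht, keys => some (ht, keys)
  | row :: rest, ht, keys =>
    let key := PySem.List.pyGetD row 0 0
    if ht.contains key then none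
    else pvBuildA rest (ht.insert key row) (keys ++ [key])

-- inner loop over keyIndex, carrying lastNum; false = the early `return False`
def pvKeyLoopA (ht : PySem.Dict Int (List Int)) (column : Int) : Int → List Int → Bool
  | _, [] => true
  | lastNum, k :: rest =>
    let nextNum := PySem.List.pyGetD (ht.getD k []) column 0
    if lastNum ≥ nextNum then false else pvKeyLoopA ht column nextNum rest

-- outer loop over column
def pvColLoopA (ht : PySem.Dict Int (List Int)) (keys : List Int) : List Int → Bool
  | [] => true
  | c :: cs =>
    let lastNum := PySem.List.pyGetD (ht.getD (PySem.List.pyGetD keys 0 0) []) c 0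
    if pvKeyLoopA ht c lastNum (keys.drop 1) then pvColLoopA ht keys cs else false

def rowsRearranging (matrix : List (List Int)) : Bool :=
  if matrix.length == 1 then true
  else
    match pvBuildA matrix PySem.Dict.empty [] with
    | none => false
    | some (ht, keys) =>
      let skeys := PySem.List.sorted keys (fun k => k) false
      pvColLoopA ht skeys (PySem.List.pyRange 1 ((PySem.List.pyGetD matrix 0 []).length : Int) 1)

-- ===== PORT B =====
-- `_dominates(a, b, m)` of Source B: the loop `for c in range(m)`
def pvLtAll (a b : List Int) : List Int → Bool
  | [] => true
  | c :: cs =>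
    if PySem.List.pyGetD a c 0 ≥ PySem.List.pyGetD b c 0 then false else pvLtAll a b cs

-- inner loop `for b in matrix[i + 1:]`
def pvInnerB (cols : List Int) (a : List Int) : List (List Int) → Bool
  | [] => true
  | b :: rest =>
    if !(pvLtAll a b cols) && !(pvLtAll b a cols) then false else pvInnerB cols a rest

-- outer loop `for i in range(len(matrix))`, iterated as the suffixes it slices
def pvOuterB (cols : List Int) : List (List Int) → Bool
  | [] => true
  | a :: rest => if pvInnerB cols a rest then pvOuterB cols rest else false

def rowsRearranging_alt (matrix : List (List Int)) : Bool :=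
  let m := (PySem.List.pyGetD matrix 0 []).length
  pvOuterB (PySem.List.pyRange 0 (m : Int) 1) matrix

-- ===== PRECONDITION & SPEC =====
-- Pre_ excludes the empty matrix (A raises IndexError at matrix[0]) and multi-row matrices in
-- which row 0 is empty or some row is shorter than row 0: there A raises IndexError or returns
-- False from its duplicate-key check while B's scan over range(len(matrix[0])) raises IndexError.
def Pre_rowsRearranging (matrix : List (List Int)) : Prop :=
  matrix ≠ [] ∧ (matrix.length = 1 ∨
    (matrix.headI ≠ [] ∧ ∀ row ∈ matrix, matrix.headI.length ≤ row.length))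
instance (matrix : List (List Int)) : Decidable (Pre_rowsRearranging matrix) := by
  unfold Pre_rowsRearranging; infer_instance

def pvWitness_rowsRearranging : List (List Int) := [[1, 2], [3, 4]]

def Spec_rowsRearranging (matrix : List (List Int)) (out : Bool) : Prop := out = rowsRearranging_alt matrix
instance (matrix : List (List Int)) (out : Bool) : Decidable (Spec_rowsRearranging matrix out) := by unfold Spec_rowsRearranging; infer_instance

-- ===== CLAIM (what is proved, stated in full; the proofs are below) =====
def Claim_equal_rowsRearranging : Prop := ∀ (matrix : List (List Int)), Dom_rowsRearranging matrix → Pre_rowsRearranging matrix → Spec_rowsRearranging matrix (rowsRearranging matrix)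

-- ===== LEMMAS AND PROOFS =====

-- head of a row, as A and B read it
def pvHd (r : List Int) : Int := PySem.List.pyGetD r 0 0

def pvIns (d : PySem.Dict Int (List Int)) (r : List Int) : PySem.Dict Int (List Int) :=
  d.insert (pvHd r) r

theorem pvBuildA_eq (rows : List (List Int)) (ht : PySem.Dict Int (List Int)) (ks : List Int) :
    pvBuildA rows ht ks =
      if (rows.map pvHd).Nodup ∧ ∀ r ∈ rows, ht.contains (pvHd r) = false
      then some (rows.foldl pvIns ht, ks ++ rows.map pvHd)
      else none := by
  induction rows generalizing ht ks with
  | nil => simp [pvBuildA]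
  | cons row rest ih =>
    simp only [pvBuildA]
    by_cases hc : ht.contains (pvHd row) = true
    · rw [if_pos (show ht.contains (PySem.List.pyGetD row 0 0) = true from hc)]
      rw [if_neg]
      rintro ⟨-, hall⟩
      exact absurd (hall row (List.mem_cons_self)) (by simp [hc])
    · rw [if_neg (show ¬ ht.contains (PySem.List.pyGetD row 0 0) = true from hc)]
      rw [ih]
      have hcond : ((rest.map pvHd).Nodup ∧
          ∀ r ∈ rest, (ht.insert (PySem.List.pyGetD row 0 0) row).contains (pvHd r) = false) ↔
          (((row :: rest).map pvHd).Nodup ∧ ∀ r ∈ row :: rest, ht.contains (pvHd r) = false) := by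
        have hb : ht.contains (pvHd row) = false := by
          cases h : ht.contains (pvHd row) <;> simp_all
        constructor
        · rintro ⟨h1, h2⟩
          refine ⟨by
            simp only [List.map_cons, List.nodup_cons]
            refine ⟨fun hmem => ?_, h1⟩
            obtain ⟨r, hr, hrk⟩ := List.mem_map.mp hmem
            have := h2 r hr
            rw [PySem.Dict.contains_insert] at this
            simp [pvHd] at this hrk
            exact absurd hrk (by simpa using this.1), ?_⟩
          intro r hr
          rcases List.mem_cons.mp hr with rfl | hr'
          · exact hb
          · have := h2 r hr'
            rw [PySem.Dict.contains_insert] at this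
            simpa using (Bool.or_eq_false_iff.mp this).2
        · rintro ⟨h1, h2⟩
          simp only [List.map_cons, List.nodup_cons] at h1
          refine ⟨h1.2, fun r hr => ?_⟩
          rw [PySem.Dict.contains_insert]
          have hne : pvHd r ≠ pvHd row := by
            intro he
            exact h1.1 (List.mem_map.mpr ⟨r, hr, he⟩)
          simp only [Bool.or_eq_false_iff]
          exact ⟨by simpa [pvHd] using hne, h2 r (List.mem_cons_of_mem _ hr)⟩
      split_ifs with ha hbif hbif
      · simp [pvIns, pvHd, List.append_assoc]
      · exact absurd (hcond.mp ha) hbif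
      · exact absurd (hcond.mpr hbif) ha
      · rfl

theorem getD_foldl_pvIns_of_not_mem (rows : List (List Int)) (d : PySem.Dict Int (List Int))
    (k : Int) (h : k ∉ rows.map pvHd) :
    (rows.foldl pvIns d).getD k [] = d.getD k [] := by
  induction rows generalizing d with
  | nil => rfl
  | cons row rest ih =>
    simp only [List.map_cons, List.mem_cons, not_or] at h
    rw [List.foldl_cons, ih _ h.2, pvIns, PySem.Dict.getD_insert_of_ne _ _ _ h.1]

theorem getD_foldl_pvIns_of_mem (rows : List (List Int)) (d : PySem.Dict Int (List Int))
    (r : List Int) (hr : r ∈ rows) (hnd : (rows.map pvHd).Nodup) :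
    (rows.foldl pvIns d).getD (pvHd r) [] = r := by
  induction rows generalizing d with
  | nil => cases hr
  | cons row rest ih =>
    simp only [List.map_cons, List.nodup_cons] at hnd
    rcases List.mem_cons.mp hr with rfl | hr'
    · rw [List.foldl_cons, getD_foldl_pvIns_of_not_mem _ _ _ hnd.1, pvIns,
        PySem.Dict.getD_insert_self]
    · exact ih _ hr' hnd.2

theorem pvKeyLoopA_iff (ht : PySem.Dict Int (List Int)) (c lastNum : Int) (ks : List Int) :
    pvKeyLoopA ht c lastNum ks = true ↔
      List.IsChain (· < ·) (lastNum :: ks.map (fun k => PySem.List.pyGetD (ht.getD k []) c 0)) := by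
  induction ks generalizing lastNum with
  | nil => simp [pvKeyLoopA]
  | cons k rest ih =>
    simp only [pvKeyLoopA, List.map_cons, List.isChain_cons_cons]
    by_cases h : lastNum ≥ PySem.List.pyGetD (ht.getD k []) c 0
    · simp [h, not_lt.mpr h]
    · simp only [if_neg h, ih]
      simp [lt_of_not_ge h]

theorem pvColLoopA_iff (ht : PySem.Dict Int (List Int)) (k0 : Int) (kr cols : List Int) :
    pvColLoopA ht (k0 :: kr) cols = true ↔
      ∀ c ∈ cols, List.IsChain
        (fun a b => PySem.List.pyGetD (ht.getD a []) c 0 < PySem.List.pyGetD (ht.getD b []) c 0)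
        (k0 :: kr) := by
  induction cols with
  | nil => simp [pvColLoopA]
  | cons c cs ih =>
    simp only [pvColLoopA, PySem.List.pyGetD_zero_cons, List.drop_one, List.tail_cons]
    by_cases h : pvKeyLoopA ht c (PySem.List.pyGetD (ht.getD k0 []) c 0) kr = true
    · rw [if_pos h, ih]
      have hch : List.IsChain
          (fun a b => PySem.List.pyGetD (ht.getD a []) c 0 < PySem.List.pyGetD (ht.getD b []) c 0)
          (k0 :: kr) := by
        rw [← List.isChain_map (R := (· < ·)) (fun k => PySem.List.pyGetD (ht.getD k []) c 0)]
        simpa using (pvKeyLoopA_iff ht c _ kr).mp h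
      constructor
      · intro hall c' hc'
        rcases List.mem_cons.mp hc' with rfl | h'
        · exact hch
        · exact hall c' h'
      · intro hall c' hc'
        exact hall c' (List.mem_cons_of_mem _ hc')
    · rw [if_neg h]
      simp only [Bool.false_eq_true, false_iff]; push Not
      refine ⟨c, List.mem_cons_self, fun hch => h ?_⟩
      rw [pvKeyLoopA_iff]
      have := (List.isChain_map (R := (· < ·))
        (fun k => PySem.List.pyGetD (ht.getD k []) c 0) (l := k0 :: kr)).mpr hch
      simpa using this

-- B-side characterisations
theorem pvLtAll_iff (a b : List Int) (cols : List Int) :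
    pvLtAll a b cols = true ↔
      ∀ c ∈ cols, PySem.List.pyGetD a c 0 < PySem.List.pyGetD b c 0 := by
  induction cols with
  | nil => simp [pvLtAll]
  | cons c cs ih =>
    simp only [pvLtAll]
    by_cases h : PySem.List.pyGetD a c 0 ≥ PySem.List.pyGetD b c 0
    · simp [h, not_lt.mpr h]
    · simp [if_neg h, ih, lt_of_not_ge h]

-- the comparability relation B checks
def pvComp (cols : List Int) (a b : List Int) : Prop :=
  pvLtAll a b cols = true ∨ pvLtAll b a cols = true

theorem pvInnerB_iff (cols : List Int) (a : List Int) (rest : List (List Int)) :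
    pvInnerB cols a rest = true ↔ ∀ b ∈ rest, pvComp cols a b := by
  induction rest with
  | nil => simp [pvInnerB]
  | cons b r ih =>
    simp only [pvInnerB]
    by_cases h : pvComp cols a b
    · have : (!(pvLtAll a b cols) && !(pvLtAll b a cols)) = false := by
        rcases h with h | h <;> simp [h]
      simp [this, ih, h]
    · have h1 : pvLtAll a b cols = false := by
        cases hx : pvLtAll a b cols
        · rfl
        · exact absurd (Or.inl hx) h
      have h2 : pvLtAll b a cols = false := by
        cases hx : pvLtAll b a cols
        · rfl
        · exact absurd (Or.inr hx) h
      simp only [h1, h2, Bool.not_false, Bool.and_self, if_true]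
      simp only [Bool.false_eq_true, false_iff]
      push Not
      exact ⟨b, List.mem_cons_self, h⟩

theorem pvOuterB_iff (cols : List Int) (rows : List (List Int)) :
    pvOuterB cols rows = true ↔ rows.Pairwise (pvComp cols) := by
  induction rows with
  | nil => simp [pvOuterB]
  | cons a rest ih =>
    simp only [pvOuterB, List.pairwise_cons]
    by_cases h : pvInnerB cols a rest = true
    · rw [if_pos h, ih]
      exact ⟨fun hp => ⟨(pvInnerB_iff cols a rest).mp h, hp⟩, fun hp => hp.2⟩
    · rw [if_neg h]
      exact iff_of_false (by simp) (fun hp => h ((pvInnerB_iff cols a rest).mpr hp.1))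

-- comparability implies distinct first entries (width > 0)
theorem pvComp_hd_ne (m : Nat) (hm : 0 < m) (a b : List Int)
    (h : pvComp (PySem.List.pyRange 0 (m : Int) 1) a b) : pvHd a ≠ pvHd b := by
  have h0 : (0 : Int) ∈ PySem.List.pyRange 0 (m : Int) 1 :=
    PySem.List.mem_pyRange_one.mpr ⟨le_refl 0, by exact_mod_cast hm⟩
  rcases h with h | h
  · exact ne_of_lt ((pvLtAll_iff a b _).mp h 0 h0)
  · exact (ne_of_lt ((pvLtAll_iff b a _).mp h 0 h0)).symm

-- the main case: at least two rows, positive width, distinct first elements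
theorem main_nodup (m0 : List Int) (mrest : List (List Int))
    (hL : 0 < m0.length)
    (hlen : ¬ (((m0 :: mrest).length == 1) = true))
    (hnd : ((m0 :: mrest).map pvHd).Nodup) :
    rowsRearranging (m0 :: mrest) = rowsRearranging_alt (m0 :: mrest) := by
  have hbuild : pvBuildA (m0 :: mrest) PySem.Dict.empty [] =
      some ((m0 :: mrest).foldl pvIns PySem.Dict.empty, (m0 :: mrest).map pvHd) := by
    rw [pvBuildA_eq, if_pos ⟨hnd, fun r _ => PySem.Dict.contains_empty _⟩]
    simp
  have hlook : ∀ r ∈ m0 :: mrest,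
      ((m0 :: mrest).foldl pvIns PySem.Dict.empty).getD (pvHd r) [] = r :=
    fun r hr => getD_foldl_pvIns_of_mem _ _ r hr hnd
  have hmapf : ((m0 :: mrest).map pvHd).map
      (fun k => ((m0 :: mrest).foldl pvIns PySem.Dict.empty).getD k []) = m0 :: mrest := by
    rw [List.map_map]
    calc ((m0 :: mrest).map fun r =>
          ((m0 :: mrest).foldl pvIns PySem.Dict.empty).getD (pvHd r) [])
        = (m0 :: mrest).map id := List.map_congr_left (fun r hr => hlook r hr)
      _ = m0 :: mrest := List.map_id _
  have hperm : (PySem.List.sorted ((m0 :: mrest).map pvHd) (fun k => k) false).Perm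
      ((m0 :: mrest).map pvHd) := PySem.List.sorted_perm _ _ _
  have hsknd : (PySem.List.sorted ((m0 :: mrest).map pvHd) (fun k => k) false).Nodup :=
    hperm.nodup_iff.mpr hnd
  have hskpw : (PySem.List.sorted ((m0 :: mrest).map pvHd) (fun k => k) false).Pairwise
      (· < ·) := by
    have hle := PySem.List.sorted_pairwise ((m0 :: mrest).map pvHd) (fun k => k)
    exact (hle.and hsknd).imp (fun h => lt_of_le_of_ne h.1 h.2)
  obtain ⟨k0, kr, hsk0⟩ : ∃ a l,
      PySem.List.sorted ((m0 :: mrest).map pvHd) (fun k => k) false = a :: l := by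
    cases hsk : PySem.List.sorted ((m0 :: mrest).map pvHd) (fun k => k) false with
    | nil => exact absurd ((PySem.List.sorted_eq_nil_iff _ _ _).mp hsk) (by simp)
    | cons a l => exact ⟨a, l, rfl⟩
  rw [hsk0] at hperm hsknd hskpw
  have hfhd : ∀ k ∈ k0 :: kr,
      pvHd (((m0 :: mrest).foldl pvIns PySem.Dict.empty).getD k []) = k := by
    intro k hk
    obtain ⟨r, hr, rfl⟩ := List.mem_map.mp (hperm.subset hk)
    rw [hlook r hr]
  have hA : rowsRearranging (m0 :: mrest) =
      pvColLoopA ((m0 :: mrest).foldl pvIns PySem.Dict.empty) (k0 :: kr)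
        (PySem.List.pyRange 1 (m0.length : Int) 1) := by
    simp only [rowsRearranging]
    rw [if_neg hlen, hbuild]
    simp only [PySem.List.pyGetD_zero_cons, hsk0]
  have hB : rowsRearranging_alt (m0 :: mrest) =
      pvOuterB (PySem.List.pyRange 0 (m0.length : Int) 1) (m0 :: mrest) := by
    simp only [rowsRearranging_alt, PySem.List.pyGetD_zero_cons]
  have hSperm : ((k0 :: kr).map
      (fun k => ((m0 :: mrest).foldl pvIns PySem.Dict.empty).getD k [])).Perm (m0 :: mrest) := by
    have := hperm.map (fun k => ((m0 :: mrest).foldl pvIns PySem.Dict.empty).getD k [])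
    rwa [hmapf] at this
  have hBside : (m0 :: mrest).Pairwise (pvComp (PySem.List.pyRange 0 (m0.length : Int) 1)) ↔
      (k0 :: kr).Pairwise (fun k1 k2 => pvComp (PySem.List.pyRange 0 (m0.length : Int) 1)
        (((m0 :: mrest).foldl pvIns PySem.Dict.empty).getD k1 [])
        (((m0 :: mrest).foldl pvIns PySem.Dict.empty).getD k2 [])) := by
    rw [← List.pairwise_map
      (f := fun k => ((m0 :: mrest).foldl pvIns PySem.Dict.empty).getD k [])]
    exact (List.Perm.pairwise_iff (fun {_ _} h => Or.symm h) hSperm).symm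
  -- column-0 pairwise over the sorted keys
  have h0pw : (k0 :: kr).Pairwise (fun k1 k2 =>
      PySem.List.pyGetD (((m0 :: mrest).foldl pvIns PySem.Dict.empty).getD k1 []) 0 0 <
      PySem.List.pyGetD (((m0 :: mrest).foldl pvIns PySem.Dict.empty).getD k2 []) 0 0) := by
    refine List.Pairwise.imp_of_mem ?_ hskpw
    intro a b ha hb hab
    have ha' := hfhd a ha
    have hb' := hfhd b hb
    rw [pvHd] at ha' hb'
    rw [ha', hb']
    exact hab
  rw [hA, hB, Bool.eq_iff_iff, pvColLoopA_iff, pvOuterB_iff, hBside]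
  constructor
  · -- A true → B true: chains per column give full pairwise dominance
    intro hall
    have hcolpw : ∀ c : Int, c ∈ PySem.List.pyRange 1 (m0.length : Int) 1 →
        (k0 :: kr).Pairwise (fun k1 k2 =>
          PySem.List.pyGetD (((m0 :: mrest).foldl pvIns PySem.Dict.empty).getD k1 []) c 0 <
          PySem.List.pyGetD (((m0 :: mrest).foldl pvIns PySem.Dict.empty).getD k2 []) c 0) := by
      intro c hc
      have hchm := (List.isChain_map (R := (· < ·))
        (fun k => PySem.List.pyGetD
          (((m0 :: mrest).foldl pvIns PySem.Dict.empty).getD k []) c 0)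
        (l := k0 :: kr)).mpr (hall c hc)
      have hpwm := List.isChain_iff_pairwise.mp hchm
      exact (List.pairwise_map).mp hpwm
    rw [List.pairwise_iff_getElem] at h0pw ⊢
    intro i j hi hj hij
    refine Or.inl ((pvLtAll_iff _ _ _).mpr ?_)
    intro c hc
    obtain ⟨hc0, hcm⟩ := PySem.List.mem_pyRange_one.mp hc
    by_cases hcz : c = 0
    · subst hcz
      exact h0pw i j hi hj hij
    · have hc1 : c ∈ PySem.List.pyRange 1 (m0.length : Int) 1 :=
        PySem.List.mem_pyRange_one.mpr ⟨by omega, hcm⟩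
      have := hcolpw c hc1
      rw [List.pairwise_iff_getElem] at this
      exact this i j hi hj hij
  · -- B true → A true: comparability plus key order forces each column's chain
    intro hpw c hc
    obtain ⟨hc1, hcm⟩ := PySem.List.mem_pyRange_one.mp hc
    refine List.Pairwise.isChain (List.Pairwise.imp_of_mem ?_ (hskpw.and hpw))
    rintro a b ha hb ⟨hab, hcomp⟩
    have hdom : pvLtAll (((m0 :: mrest).foldl pvIns PySem.Dict.empty).getD a [])
        (((m0 :: mrest).foldl pvIns PySem.Dict.empty).getD b [])
        (PySem.List.pyRange 0 (m0.length : Int) 1) = true := by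
      rcases hcomp with h | h
      · exact h
      · exfalso
        have h0 : (0 : Int) ∈ PySem.List.pyRange 0 (m0.length : Int) 1 :=
          PySem.List.mem_pyRange_one.mpr ⟨le_refl 0, by exact_mod_cast hL⟩
        have hlt := (pvLtAll_iff _ _ _).mp h 0 h0
        have ha' := hfhd a ha
        have hb' := hfhd b hb
        rw [pvHd] at ha' hb'
        rw [ha', hb'] at hlt
        omega
    exact (pvLtAll_iff _ _ _).mp hdom c
      (PySem.List.mem_pyRange_one.mpr ⟨by omega, hcm⟩)

-- main case split
theorem rowsRearranging_eq (matrix : List (List Int)) (h : Pre_rowsRearranging matrix) :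
    rowsRearranging matrix = rowsRearranging_alt matrix := by
  obtain ⟨hne, hshape⟩ := h
  by_cases h1 : matrix.length = 1
  · obtain ⟨r, rfl⟩ := List.length_eq_one_iff.mp h1
    simp [rowsRearranging, rowsRearranging_alt, pvOuterB, pvInnerB]
  · have hrect := hshape.resolve_left h1
    obtain ⟨m0, mrest, rfl⟩ : ∃ a l, matrix = a :: l := by
      cases matrix with
      | nil => exact absurd rfl hne
      | cons a l => exact ⟨a, l, rfl⟩
    simp only [List.headI_cons] at hrect
    have hL : 0 < m0.length := List.length_pos_iff.mpr hrect.1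
    have hlen : ¬ ((m0 :: mrest).length == 1) = true := by
      simpa using h1
    by_cases hnd : ((m0 :: mrest).map pvHd).Nodup
    · exact main_nodup m0 mrest hL hlen hnd
    · -- duplicate first elements: both programs return false
      have hA : rowsRearranging (m0 :: mrest) = false := by
        simp only [rowsRearranging]
        rw [if_neg hlen, pvBuildA_eq, if_neg (fun hcon => hnd hcon.1)]
      have hB : rowsRearranging_alt (m0 :: mrest) = false := by
        cases hBv : rowsRearranging_alt (m0 :: mrest) with
        | false => rfl
        | true =>
          exfalso
          unfold rowsRearranging_alt at hBv
          simp only [PySem.List.pyGetD_zero_cons] at hBv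
          rw [pvOuterB_iff] at hBv
          have hpw : ((m0 :: mrest).map pvHd).Pairwise (· ≠ ·) := by
            rw [List.pairwise_map]
            exact hBv.imp (fun h => pvComp_hd_ne m0.length hL _ _ h)
          exact hnd hpw
      rw [hA, hB]

-- ===== VERDICT (by name: the statement is the Claim_ definition above) =====
theorem rowsRearranging_spec : Claim_equal_rowsRearranging := by
  intro matrix _ hpre
  exact rowsRearranging_eq matrix hpre
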